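-- pv_equiv track=rewrite | github.com/jjm6604/problem | 프로그래머스/2/12973. 짝지어 제거하기/짝지어 제거하기.py | solution
-- ===== SOURCE A (Python) =====
-- def solution(s):
--     lst = [s[0]]
--     N = len(s)
--     n = 1
--
--     while n < N:
--         if not lst:
--             lst.append(s[n])
--             n += 1
--         else:
--             if lst[-1] == s[n]:
--                 while True:
--                     if n == N or not lst or lst[-1] != s[n]:
--                         break
--                     lst.pop()
--                     n += 1
--
--             else:
--                 lst.append(s[n])
--                 n += 1
--
--     if lst:
--         return 0
--     else:
--         return 1
-- ===== SOURCE B (Python) =====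
-- def solution(s):
--     t = list(s)
--     while True:
--         u = []
--         i = 0
--         while i < len(t):
--             if i + 1 < len(t) and t[i] == t[i + 1]:
--                 i += 2
--             else:
--                 u.append(t[i])
--                 i += 1
--         if u == t:
--             return 1 if not t else 0
--         t = u
-- ===== Notes on version B (the rewrite author's own statement) =====
-- stated objective: alternative
-- what changed: Replaced A's single-pass stack (with its nested pop-while loop) by repeated whole-string scans that delete every adjacent equal pair per pass until a fixpoint, then test emptiness.
import Mathlib
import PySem

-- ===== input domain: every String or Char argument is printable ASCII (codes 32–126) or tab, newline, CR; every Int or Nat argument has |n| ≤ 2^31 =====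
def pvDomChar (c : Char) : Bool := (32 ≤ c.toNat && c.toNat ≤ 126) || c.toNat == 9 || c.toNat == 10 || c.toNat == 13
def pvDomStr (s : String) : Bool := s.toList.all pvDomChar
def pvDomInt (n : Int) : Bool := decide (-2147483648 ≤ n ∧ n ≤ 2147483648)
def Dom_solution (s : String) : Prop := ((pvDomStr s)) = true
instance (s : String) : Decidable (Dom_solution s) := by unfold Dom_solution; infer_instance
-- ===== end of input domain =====

-- B replaces A's one-pass stack by repeated global pair-removal passes until a fixpoint
-- (alternative decomposition, not faster); equal on every nonempty string (Pre_solution).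

-- ===== PORT A =====
-- the inner 'while True: … break' loop of A: pop lst and advance n while lst's last equals s[n]
-- (Python's break test 'n == N' is rendered '¬ n < N': identical whenever n ≤ N, which the loop maintains,
--  and it makes the recursion terminate on all inputs)
def innerA (l : List Char) (N : Nat) (lst : List Char) (n : Nat) : List Char × Nat :=
  if h : n < N ∧ lst ≠ [] ∧ lst.getLast? = some (l.getD n ' ') then
    innerA l N lst.dropLast (n + 1)
  else (lst, n)
termination_by N - n
decreasing_by omega

theorem innerA_le (l : List Char) (N : Nat) (lst : List Char) (n : Nat) :
    n ≤ (innerA l N lst n).2 := by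
  induction lst, n using innerA.induct l N with
  | case1 lst n h ih => rw [innerA, dif_pos h]; omega
  | case2 lst n h => rw [innerA, dif_neg h]

theorem innerA_step (l : List Char) (N : Nat) (lst : List Char) (n : Nat)
    (h : n < N ∧ lst ≠ [] ∧ lst.getLast? = some (l.getD n ' ')) :
    innerA l N lst n = innerA l N lst.dropLast (n + 1) := by
  rw [innerA, dif_pos h]

-- the outer 'while n < N' loop of A
def outerA (l : List Char) (N : Nat) (lst : List Char) (n : Nat) : List Char :=
  if h : n < N then
    if lst = [] then
      outerA l N (lst ++ [l.getD n ' ']) (n + 1)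
    else if hlast : lst.getLast? = some (l.getD n ' ') then
      outerA l N (innerA l N lst n).1 (innerA l N lst n).2
    else
      outerA l N (lst ++ [l.getD n ' ']) (n + 1)
  else lst
termination_by N - n
decreasing_by
  · omega
  · have h2 : n + 1 ≤ (innerA l N lst.dropLast (n + 1)).2 := innerA_le ..
    rw [innerA_step l N lst n ⟨h, by assumption, by assumption⟩]
    omega
  · omega

def solution (s : String) : Int :=
  match PySem.Str.pyGet? s 0 with
  | none => 0      -- A raises IndexError here (s[0] on ''); excluded by Pre_solution
  | some c =>
    let l := s.toList
    let lst := outerA l l.length [c] 1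
    if lst = [] then 1 else 0

-- ===== PORT B =====
-- one left-to-right pass deleting every adjacent equal pair (the inner 'while i < len(t)' scan of Source B;
-- skipping two positions = dropping both, keeping one = consing it)
def pass1 : List Char → List Char
  | [] => []
  | [a] => [a]
  | a :: b :: t => if a = b then pass1 t else a :: pass1 (b :: t)

theorem pass1_length_le (l : List Char) : (pass1 l).length ≤ l.length := by
  induction l using pass1.induct with
  | case1 => simp [pass1]
  | case2 a => simp [pass1]
  | case3 b t ih =>
      have e : pass1 (b :: b :: t) = pass1 t := by simp [pass1]
      rw [e]; simp; omega
  | case4 a b t hne ih => simp only [pass1, if_neg hne]; simpa using ih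

theorem pass1_length_lt (l : List Char) (h : pass1 l ≠ l) : (pass1 l).length < l.length := by
  induction l using pass1.induct with
  | case1 => simp [pass1] at h
  | case2 a => simp [pass1] at h
  | case3 b t ih =>
      have e : pass1 (b :: b :: t) = pass1 t := by simp [pass1]
      rw [e]
      have := pass1_length_le t; simp; omega
  | case4 a b t hne ih =>
      simp only [pass1, if_neg hne] at h ⊢
      have : pass1 (b :: t) ≠ b :: t := by intro he; exact h (by rw [he])
      have := ih this; simpa using this

-- the outer 'while True' loop of Source B: re-scan until a pass changes nothing
def loopB (t : List Char) : List Char :=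
  if pass1 t = t then t else loopB (pass1 t)
termination_by t.length
decreasing_by exact pass1_length_lt t (by assumption)

def solution_alt (s : String) : Int :=
  let f := loopB s.toList
  if f = [] then 1 else 0

-- ===== PRECONDITION & SPEC =====
-- A evaluates s[0] unconditionally, so it raises IndexError exactly on the empty string.
def Pre_solution (s : String) : Prop := s.toList ≠ []
instance (s : String) : Decidable (Pre_solution s) := by unfold Pre_solution; infer_instance
def pvWitness_solution : String := "baab"

def Spec_solution (s : String) (out : Int) : Prop := out = solution_alt s
instance (s : String) (out : Int) : Decidable (Spec_solution s out) := by unfold Spec_solution; infer_instance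

-- ===== CLAIM (what is proved, stated in full; the proofs are below) =====
def Claim_equal_solution : Prop := ∀ (s : String), Dom_solution s → Pre_solution s → Spec_solution s (solution s)

-- ===== LEMMAS AND PROOFS =====

-- the canonical one-character stack step: cancel against the top or push
def step (st : List Char) (c : Char) : List Char :=
  if st.getLast? = some c then st.dropLast else st ++ [c]

def red (st l : List Char) : List Char := l.foldl step st

def Reduced (l : List Char) : Prop := l.IsChain (fun a b => a ≠ b)

theorem reduced_step {st : List Char} (h : Reduced st) (c : Char) : Reduced (step st c) := by
  unfold step
  split_ifs with hl
  · exact h.prefix st.dropLast_prefix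
  · refine List.isChain_append.2 ⟨h, by simp, ?_⟩
    intro x hx y hy
    simp at hy; subst hy
    intro he; subst he; exact hl hx

theorem step_step {st : List Char} (h : Reduced st) (c : Char) : step (step st c) c = st := by
  by_cases hl : st.getLast? = some c
  · have hne : st ≠ [] := by intro he; subst he; simp at hl
    have hst : st.dropLast ++ [c] = st := by
      have := List.dropLast_append_getLast hne
      rwa [List.getLast_eq_iff_getLast?_eq_some hne |>.2 hl] at this
    have hdl : st.dropLast.getLast? ≠ some c := by
      intro hc
      have hred : Reduced (st.dropLast ++ [c]) := by rwa [hst]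
      rcases List.isChain_append.1 hred with ⟨_, _, h3⟩
      exact h3 c hc c rfl rfl
    unfold step
    rw [if_pos hl, if_neg hdl, hst]
  · unfold step
    rw [if_neg hl, if_pos (by simp), List.dropLast_concat]

theorem red_pass (l : List Char) : ∀ st, Reduced st → red st (pass1 l) = red st l := by
  induction l using pass1.induct with
  | case1 => intro st _; rfl
  | case2 a => intro st _; rfl
  | case3 b t ih =>
      intro st hst
      have e : pass1 (b :: b :: t) = pass1 t := by simp [pass1]
      rw [e, ih st hst]
      show red st t = red (step (step st b) b) t
      rw [step_step hst]
  | case4 a b t hne ih =>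
      intro st hst
      simp only [pass1, if_neg hne]
      show red (step st a) (pass1 (b :: t)) = red (step st a) (b :: t)
      exact ih (step st a) (reduced_step hst a)

theorem pass1_fix_reduced (l : List Char) (h : pass1 l = l) : Reduced l := by
  unfold Reduced
  induction l using pass1.induct with
  | case1 => simp
  | case2 a => simp
  | case3 b t ih =>
      exfalso
      have hle := pass1_length_le t
      have : (pass1 (b :: b :: t)).length = (b :: b :: t).length := by rw [h]
      rw [show pass1 (b :: b :: t) = pass1 t from by simp [pass1]] at this
      simp at this; omega
  | case4 a b t hne ih =>
      simp only [pass1, if_neg hne] at h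
      have h2 : pass1 (b :: t) = b :: t := by injection h
      exact List.isChain_cons_cons.2 ⟨hne, ih h2⟩

theorem red_reduced_append (l : List Char) : ∀ st, Reduced (st ++ l) → red st l = st ++ l := by
  induction l with
  | nil => intro st _; simp [red]
  | cons c t ih =>
      intro st h
      have hlast : st.getLast? ≠ some c := by
        intro hc
        rcases List.isChain_append.1 h with ⟨_, _, h3⟩
        exact h3 c hc c rfl rfl
      show red (step st c) t = st ++ c :: t
      rw [step, if_neg hlast]
      have h' : Reduced ((st ++ [c]) ++ t) := by simpa using h
      rw [ih (st ++ [c]) h']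
      simp

theorem loopB_eq_red (t : List Char) : loopB t = red [] t := by
  induction t using loopB.induct with
  | case1 t h =>
      rw [loopB, if_pos h]
      exact (red_reduced_append t [] (by simpa using pass1_fix_reduced t h)).symm
  | case2 t h ih =>
      rw [loopB, if_neg h, ih, red_pass t [] (by simp [Reduced])]

theorem innerA_red (l : List Char) (lst : List Char) (n : Nat) :
    red (innerA l l.length lst n).1 (l.drop (innerA l l.length lst n).2) = red lst (l.drop n) := by
  induction lst, n using innerA.induct l l.length with
  | case1 lst n h ih =>
      rw [innerA_step l l.length lst n h, ih]
      obtain ⟨hn, hne, hlast⟩ := h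
      have hd : l.drop n = l[n] :: l.drop (n + 1) := List.drop_eq_getElem_cons hn
      have hg : l.getD n ' ' = l[n] := List.getD_eq_getElem l ' ' hn
      rw [hd]
      show red lst.dropLast (l.drop (n + 1)) = red (step lst l[n]) (l.drop (n + 1))
      rw [step, if_pos (by rw [← hg]; exact hlast)]
  | case2 lst n h => rw [innerA, dif_neg h]

theorem outerA_red (l : List Char) (lst : List Char) (n : Nat) :
    outerA l l.length lst n = red lst (l.drop n) := by
  induction lst, n using outerA.induct l l.length with
  | case1 n hn ih =>
      rw [outerA, dif_pos hn, if_pos rfl, ih, List.drop_eq_getElem_cons hn]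
      show red ([] ++ [l.getD n ' ']) (l.drop (n + 1)) = red (step [] l[n]) (l.drop (n + 1))
      rw [step, if_neg (by simp), List.getD_eq_getElem l ' ' hn]
  | case2 lst n hn hnil hlast ih =>
      rw [outerA, dif_pos hn, if_neg hnil, dif_pos hlast, ih, innerA_red]
  | case3 lst n hn hnil hlast ih =>
      rw [outerA, dif_pos hn, if_neg hnil, dif_neg hlast, ih, List.drop_eq_getElem_cons hn]
      rw [List.getD_eq_getElem l ' ' hn] at hlast
      show red (lst ++ [l.getD n ' ']) (l.drop (n + 1)) = red (step lst l[n]) (l.drop (n + 1))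
      rw [step, if_neg hlast, List.getD_eq_getElem l ' ' hn]
  | case4 lst n hn =>
      rw [outerA, dif_neg hn, List.drop_of_length_le (by omega)]
      rfl

-- ===== VERDICT (by name: the statement is the Claim_ definition above) =====
theorem solution_spec : Claim_equal_solution := by
  intro s _ hpre
  unfold Spec_solution Pre_solution at *
  obtain ⟨c, rest, hl⟩ : ∃ c rest, s.toList = c :: rest := by
    cases h : s.toList with
    | nil => exact absurd h hpre
    | cons c rest => exact ⟨c, rest, rfl⟩
  unfold solution solution_alt
  have hget : PySem.Str.pyGet? s 0 = some c := by
    simp [hl]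
  rw [hget]
  simp only [loopB_eq_red]
  have hA : outerA s.toList s.toList.length [c] 1 = red [c] (s.toList.drop 1) :=
    outerA_red s.toList [c] 1
  have hB : red [] s.toList = red [c] (s.toList.drop 1) := by
    rw [hl]
    show red (step [] c) rest = red [c] ((c :: rest).drop 1)
    rw [step, if_neg (by simp)]
    rfl
  rw [hA, hB]
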